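-- pv_equiv track=rewrite | github.com/mahnoorfatima997/macad-thesis-25 | benchmarking/linkography_report_generator.py | _identify_process_type
-- ===== SOURCE A (Python) =====
-- from typing import Dict, List, Any, Optional
--
-- def _identify_process_type(data: Dict[str, Any]) -> str:
--     """Identify the type of design process"""
--
--     # Analyze patterns to determine process type
--     patterns = data.get('patterns', {})
--
--     if any(p.get('type') == 'iteration' for p in patterns.values()):
--         return "Iterative design process with cyclical refinement"
--     elif any(p.get('type') == 'exploration' for p in patterns.values()):
--         return "Exploratory process with broad solution space investigation"
--     else:
--         return "Linear design process with sequential development"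
-- ===== SOURCE B (Python) =====
-- _MESSAGES = [
--     "Linear design process with sequential development",
--     "Exploratory process with broad solution space investigation",
--     "Iterative design process with cyclical refinement",
-- ]
--
--
-- def _prio(t):
--     if t == 'iteration':
--         return 2
--     if t == 'exploration':
--         return 1
--     return 0
--
--
-- def _identify_process_type(data):
--     """Identify the type of design process"""
--     patterns = data.get('patterns', {})
--     rank = 0
--     for p in patterns.values():
--         rank = max(rank, _prio(p.get('type')))
--     return _MESSAGES[rank]
-- ===== Notes on version B (the rewrite author's own statement) =====
-- stated objective: alternative
-- what changed: B replaces A's two separate short-circuiting any(...) scans and if/elif branch chain by a numeric priority scoring: one fold over patterns.values() computing the maximum priority rank (iteration=2, exploration=1, other=0), then a table lookup of the message by rank.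
import Mathlib
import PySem

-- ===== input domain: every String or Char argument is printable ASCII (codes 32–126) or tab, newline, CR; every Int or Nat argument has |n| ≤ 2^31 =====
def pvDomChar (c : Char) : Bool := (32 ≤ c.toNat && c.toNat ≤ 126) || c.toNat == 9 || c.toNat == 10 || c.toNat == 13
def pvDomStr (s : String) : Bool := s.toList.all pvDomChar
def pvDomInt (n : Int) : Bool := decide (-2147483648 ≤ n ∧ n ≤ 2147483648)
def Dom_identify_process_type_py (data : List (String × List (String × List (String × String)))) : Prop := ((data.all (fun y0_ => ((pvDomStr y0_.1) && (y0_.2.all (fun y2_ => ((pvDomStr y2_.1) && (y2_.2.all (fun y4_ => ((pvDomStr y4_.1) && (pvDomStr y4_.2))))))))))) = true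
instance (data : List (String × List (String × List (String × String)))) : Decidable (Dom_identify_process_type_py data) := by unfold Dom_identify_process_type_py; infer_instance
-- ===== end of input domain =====

-- B replaces A's two short-circuiting any(...) scans and if/elif chain by a numeric
-- priority scoring: one fold computing the maximum rank, then a message-table lookup.

-- ===== PORT A =====
def identify_process_type_py (data : List (String × List (String × List (String × String)))) : String :=
  let patterns := (PySem.Dict.ofList data).getD "patterns" []
  if ((PySem.Dict.ofList patterns).values).any
      (fun p => (PySem.Dict.ofList p).get? "type" == some "iteration") then
    "Iterative design process with cyclical refinement"
  else if ((PySem.Dict.ofList patterns).values).any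
      (fun p => (PySem.Dict.ofList p).get? "type" == some "exploration") then
    "Exploratory process with broad solution space investigation"
  else
    "Linear design process with sequential development"

-- ===== PORT B =====
def pvMessages : List String :=
  ["Linear design process with sequential development",
   "Exploratory process with broad solution space investigation",
   "Iterative design process with cyclical refinement"]

def pvPrio (t : Option String) : Nat :=
  if t == some "iteration" then 2
  else if t == some "exploration" then 1
  else 0

def identify_process_type_py_alt (data : List (String × List (String × List (String × String)))) : String :=
  let patterns := (PySem.Dict.ofList data).getD "patterns" []
  let rank := ((PySem.Dict.ofList patterns).values).foldl
    (fun r p => max r (pvPrio ((PySem.Dict.ofList p).get? "type"))) 0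
  pvMessages.getD rank ""

-- ===== PRECONDITION & SPEC =====
def Spec_identify_process_type_py (data : List (String × List (String × List (String × String)))) (out : String) : Prop := out = identify_process_type_py_alt data
instance (data : List (String × List (String × List (String × String)))) (out : String) : Decidable (Spec_identify_process_type_py data out) := by unfold Spec_identify_process_type_py; infer_instance

-- ===== CLAIM (what is proved, stated in full; the proofs are below) =====
def Claim_equal_identify_process_type_py : Prop := ∀ (data : List (String × List (String × List (String × String)))), Dom_identify_process_type_py data → Spec_identify_process_type_py data (identify_process_type_py data)

-- ===== LEMMAS AND PROOFS =====
-- the max-rank fold, started at r, computes max r (2 / 1 / 0 according to the two scans)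
theorem rank_foldl_char {α : Type} (f : α → Option String) (l : List α) (r : Nat) :
    l.foldl (fun r p => max r (pvPrio (f p))) r =
      max r (if l.any (fun p => f p == some "iteration") then 2
        else if l.any (fun p => f p == some "exploration") then 1
        else 0) := by
  induction l generalizing r with
  | nil => simp
  | cons h t ih =>
    simp only [List.foldl_cons, List.any_cons, ih]
    by_cases h1 : f h = some "iteration"
    · simp [pvPrio, h1] <;> split_ifs <;> omega
    · by_cases h2 : f h = some "exploration"
      · simp [pvPrio, h2] <;> split_ifs <;> omega
      · simp [pvPrio, h1, h2] <;> split_ifs <;> omega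

-- ===== VERDICT (by name: the statement is the Claim_ definition above) =====
theorem identify_process_type_py_spec : Claim_equal_identify_process_type_py := by
  intro data _
  unfold Spec_identify_process_type_py identify_process_type_py identify_process_type_py_alt
  dsimp only
  rw [rank_foldl_char (fun p => (PySem.Dict.ofList p).get? "type")]
  simp only [Nat.zero_max]
  split_ifs <;> first | rfl | simp_all
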